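-- pv_equiv track=rewrite | github.com/saint1415/PurpleTeamGRC | cert_expiration_monitor.py | get_alerts
-- ===== SOURCE A (Python) =====
-- def get_alerts(results):
--     """Get list of certificates requiring alerts"""
--
--     alerts = {
--         'expired': [],
--         'critical': [],
--         'warning': []
--     }
--
--     for cert in results['certificates']:
--         status = cert.get('status')
--         if status in ['expired', 'critical', 'warning']:
--             alerts[status].append(cert)
--
--     return alerts
-- ===== SOURCE B (Python) =====
-- def get_alerts(results):
--     """Get list of certificates requiring alerts"""
--     certs = results['certificates']
--     return {s: [c for c in certs if c.get('status') == s]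
--             for s in ('expired', 'critical', 'warning')}
-- ===== Notes on version B (the rewrite author's own statement) =====
-- stated objective: simpler
-- what changed: Replaces the mutable three-bucket dict and single dispatch loop with a dict comprehension over the three status keys, each bucket built by its own filtering pass over the certificate list.
import Mathlib
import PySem

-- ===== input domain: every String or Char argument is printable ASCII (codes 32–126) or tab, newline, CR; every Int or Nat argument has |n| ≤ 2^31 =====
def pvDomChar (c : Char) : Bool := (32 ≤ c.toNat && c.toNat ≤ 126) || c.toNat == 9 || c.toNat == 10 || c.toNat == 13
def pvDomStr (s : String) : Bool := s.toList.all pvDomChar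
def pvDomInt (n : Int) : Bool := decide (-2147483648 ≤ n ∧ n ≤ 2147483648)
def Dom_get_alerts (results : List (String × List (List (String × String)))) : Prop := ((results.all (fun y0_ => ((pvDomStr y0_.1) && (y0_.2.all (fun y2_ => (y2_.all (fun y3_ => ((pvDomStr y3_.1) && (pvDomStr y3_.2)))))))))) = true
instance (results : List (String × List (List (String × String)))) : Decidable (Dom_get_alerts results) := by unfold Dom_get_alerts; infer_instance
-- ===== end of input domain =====

-- B replaces A's mutable three-bucket dict and single dispatch loop with a dict
-- comprehension: one filtering pass per status key (objective: simpler).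


-- ===== PORT A =====
-- results['certificates']  (first-match lookup on the association list; Pre_ guarantees the key)
def pvCerts (results : List (String × List (List (String × String)))) : List (List (String × String)) :=
  ((results.find? (fun p => p.1 == "certificates")).map (·.2)).getD []

-- cert.get('status')
def pvStatus (cert : List (String × String)) : Option String :=
  (cert.find? (fun p => p.1 == "status")).map (·.2)

-- loop body: status = cert.get('status'); if status in [...]: alerts[status].append(cert)
def pvStepA (alerts : PySem.Dict String (List (List (String × String)))) (cert : List (String × String)) :
    PySem.Dict String (List (List (String × String))) :=
  match pvStatus cert with
  | some s => if s ∈ ["expired", "critical", "warning"] then alerts.modify s [] (· ++ [cert]) else alerts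
  | none => alerts

def get_alerts (results : List (String × List (List (String × String)))) : List (String × List (List (String × String))) :=
  let alerts : PySem.Dict String (List (List (String × String))) :=
    PySem.Dict.ofList [("expired", []), ("critical", []), ("warning", [])]
  ((pvCerts results).foldl pvStepA alerts).items

-- ===== PORT B =====
def get_alerts_alt (results : List (String × List (List (String × String)))) : List (String × List (List (String × String))) :=
  let certs := pvCerts results
  ["expired", "critical", "warning"].map
    (fun s => (s, certs.filter (fun c => pvStatus c == some s)))

-- ===== PRECONDITION & SPEC =====
-- A (and B) raise KeyError when 'certificates' is absent; Pre_ excludes exactly those inputs.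
def Pre_get_alerts (results : List (String × List (List (String × String)))) : Prop :=
  results.any (fun p => p.1 == "certificates") = true
instance (results : List (String × List (List (String × String)))) : Decidable (Pre_get_alerts results) := by unfold Pre_get_alerts; infer_instance

def pvWitness_get_alerts : (List (String × List (List (String × String)))) :=
  [("certificates", [[("status", "expired")], [("status", "ok")], []])]

def Spec_get_alerts (results : List (String × List (List (String × String)))) (out : List (String × List (List (String × String)))) : Prop := out = get_alerts_alt results
instance (results : List (String × List (List (String × String)))) (out : List (String × List (List (String × String)))) : Decidable (Spec_get_alerts results out) := by unfold Spec_get_alerts; infer_instance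

-- ===== CLAIM (what is proved, stated in full; the proofs are below) =====
def Claim_equal_get_alerts : Prop := ∀ (results : List (String × List (List (String × String)))), Dom_get_alerts results → Pre_get_alerts results → Spec_get_alerts results (get_alerts results)

-- ===== LEMMAS AND PROOFS =====

-- loop invariant: folding A's step over `certs` from a three-bucket dict appends to each
-- bucket exactly the certs whose status matches that bucket's key, in order.
theorem pv_loop (certs : List (List (String × String))) :
    ∀ (e c w : List (List (String × String))),
      (certs.foldl pvStepA (PySem.Dict.mk [("expired", e), ("critical", c), ("warning", w)])).items =
        [("expired", e ++ certs.filter (fun x => pvStatus x == some "expired")),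
         ("critical", c ++ certs.filter (fun x => pvStatus x == some "critical")),
         ("warning", w ++ certs.filter (fun x => pvStatus x == some "warning"))] := by
  induction certs with
  | nil => intro e c w; simp
  | cons cert rest ih =>
    intro e c w
    simp only [List.foldl_cons, pvStepA]
    cases hs : pvStatus cert with
    | none => simp [hs, ih]
    | some s =>
      by_cases hmem : s ∈ ["expired", "critical", "warning"]
      · simp only [if_pos hmem]
        simp only [List.mem_cons, List.not_mem_nil, or_false] at hmem
        rcases hmem with rfl | rfl | rfl <;>
          simp [PySem.Dict.modify, PySem.Dict.get?, PySem.Dict.insert, PySem.Dict.getD,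
                PySem.Dict.contains, ih, hs]
      · simp only [if_neg hmem]
        simp only [List.mem_cons, List.not_mem_nil, or_false] at hmem
        push Not at hmem
        simp [hs, ih, hmem.1, hmem.2.1, hmem.2.2]

-- ===== VERDICT (by name: the statement is the Claim_ definition above) =====
theorem get_alerts_spec : Claim_equal_get_alerts := by
  intro results _ _
  unfold Spec_get_alerts get_alerts get_alerts_alt
  simpa [PySem.Dict.ofList, PySem.Dict.empty, PySem.Dict.insert, PySem.Dict.contains] using
    pv_loop (pvCerts results) [] [] []
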